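-- pv_equiv track=rewrite | github.com/yuuforest/Personal-Project | python/PCCP 모의고사 1회/체육대회.py | solution
-- ===== SOURCE A (Python) =====
-- from itertools import permutations
--
-- def solution(ability):
--
--     sport_count = len(ability[0])
--     student = [num for num in range(len(ability))]
--
--     answer = 0
--     for st in list(permutations(student, sport_count)):
--
--         count = 0
--         for sport in range(sport_count):
--             count += ability[st[sport]][sport]
--
--         answer = max(answer, count)
--
--     return answer
-- ===== SOURCE B (Python) =====
-- from itertools import combinations
--
-- def solution(ability):
--     # Bottom-up DP over subsets of still-available students, layer by layer from
--     # the last sport to the first, instead of enumerating all permutations.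
--     n = len(ability)
--     k = len(ability[0])
--     students = tuple(range(n))
--     if k > n:
--         return 0
--     # dp maps each subset of available students (of size n - j) to the best total
--     # obtainable for sports j..k-1 using only those students.  Layer j = k: 0.
--     dp = {c: 0 for c in combinations(students, n - k)}
--     for j in range(k - 1, -1, -1):
--         ndp = {}
--         for S in combinations(students, n - j):
--             ndp[S] = max(ability[i][j] + dp[tuple(x for x in S if x != i)] for i in S)
--         dp = ndp
--     return max(0, dp[students])
-- ===== Notes on version B (the rewrite author's own statement) =====
-- stated objective: faster
-- what changed: Replaces brute-force enumeration of all k-permutations of students with a layered dynamic program over subsets of still-available students (built with itertools.combinations), computing for each subset the best total for the remaining sports.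
import Mathlib
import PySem

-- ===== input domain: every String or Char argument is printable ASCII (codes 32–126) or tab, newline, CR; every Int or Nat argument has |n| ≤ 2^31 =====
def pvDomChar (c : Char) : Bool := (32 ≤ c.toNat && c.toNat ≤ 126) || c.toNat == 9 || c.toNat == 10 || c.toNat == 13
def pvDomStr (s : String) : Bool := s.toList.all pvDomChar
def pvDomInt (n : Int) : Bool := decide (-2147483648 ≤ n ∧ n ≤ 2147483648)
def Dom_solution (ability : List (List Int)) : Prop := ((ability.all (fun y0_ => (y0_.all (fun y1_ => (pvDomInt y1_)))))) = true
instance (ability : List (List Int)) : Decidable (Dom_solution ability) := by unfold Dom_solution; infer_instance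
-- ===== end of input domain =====

-- B replaces A's brute-force enumeration of all k-permutations of students by a layered
-- subset dynamic program (objective: faster, asymptotically).


-- ===== PORT A =====
def solution (ability : List (List Int)) : Int :=
  let sport_count : Nat := (PySem.List.pyGetD ability 0 []).length
  let student : List Int := PySem.List.pyRange 0 (PySem.List.len ability) 1
  (PySem.List.permutations student sport_count).foldl
    (fun answer st =>
      max answer
        ((PySem.List.pyRange 0 (sport_count : Int) 1).foldl
          (fun count sport =>
            count + PySem.List.pyGetD (PySem.List.pyGetD ability (PySem.List.pyGetD st sport 0) []) sport 0)
          0))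
    0

-- ===== PORT B =====
def solution_alt (ability : List (List Int)) : Int :=
  let n : Nat := ability.length
  let k : Nat := (PySem.List.pyGetD ability 0 []).length
  let students : List Int := PySem.List.pyRange 0 (n : Int) 1
  if k > n then 0
  else
    let dp0 : PySem.Dict (List Int) Int :=
      (PySem.List.combinations students (n - k)).foldl (fun d c => d.insert c 0) PySem.Dict.empty
    let dp :=
      (PySem.List.pyRange ((k : Int) - 1) (-1) (-1)).foldl
        (fun dp j =>
          (PySem.List.combinations students (n - j.toNat)).foldl
            (fun nd S =>
              nd.insert S
                ((PySem.List.max?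
                    (S.map (fun i =>
                      PySem.List.pyGetD (PySem.List.pyGetD ability i []) j 0
                        + dp.getD (S.filter (fun x => x != i)) 0))
                    (fun v => v)).getD 0))
            PySem.Dict.empty)
        dp0
    max 0 (dp.getD students 0)

-- ===== PRECONDITION & SPEC =====
-- A raises IndexError when ability is empty (ability[0]), or when 1 ≤ k ≤ n (k = number of
-- sports, n = number of students) and some student's row is shorter than k; Pre_ excludes
-- exactly those inputs.
def Pre_solution (ability : List (List Int)) : Prop :=
  ability ≠ [] ∧
    ((ability.headD []).length ≤ ability.length →
      ∀ row ∈ ability, (ability.headD []).length ≤ row.length)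
instance (ability : List (List Int)) : Decidable (Pre_solution ability) := by
  unfold Pre_solution; infer_instance
def pvWitness_solution : List (List Int) := [[1, 2], [3, 4]]

def Spec_solution (ability : List (List Int)) (out : Int) : Prop := out = solution_alt ability
instance (ability : List (List Int)) (out : Int) : Decidable (Spec_solution ability out) := by
  unfold Spec_solution; infer_instance

-- ===== CLAIM (what is proved, stated in full; the proofs are below) =====
def Claim_equal_solution : Prop :=
  ∀ (ability : List (List Int)), Dom_solution ability → Pre_solution ability →
    Spec_solution ability (solution ability)

-- ===== LEMMAS AND PROOFS =====

-- total cell accessor shared by both ports: ability[i][j] with default 0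
def pvA (ability : List (List Int)) (i j : Int) : Int :=
  PySem.List.pyGetD (PySem.List.pyGetD ability i []) j 0

-- positional score of a (partial) assignment starting at sport j0: Σ_t ability[st[t]][j0+t]
def pvPs (ability : List (List Int)) : Int → List Int → Int
  | _, [] => 0
  | j0, i :: t => pvA ability i j0 + pvPs ability (j0 + 1) t

-- best total for the last r sports (sports k-r .. k-1) using students from S
def pvF (ability : List (List Int)) (k : Nat) : Nat → List Int → Int
  | 0, _ => 0
  | r + 1, S =>
      ((PySem.List.max?
          (S.map (fun i =>
            pvA ability i ((k : Int) - (r + 1))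
              + pvF ability k r (S.filter (fun x => x != i))))
          (fun v => v)).getD 0)

-- "selections": each element together with the list it leaves behind
def pvSels (xs : List Int) : List (Int × List Int) :=
  (List.range xs.length).map (fun i => (xs.getD i 0, xs.eraseIdx i))

lemma pvSels_cons (x : Int) (xs : List Int) :
    pvSels (x :: xs) = (x, xs) :: (pvSels xs).map (fun p => (p.1, x :: p.2)) := by
  simp [pvSels, List.range_succ_eq_map, List.map_map]

lemma pvSels_eq_of_nodup (xs : List Int) (h : xs.Nodup) :
    pvSels xs = xs.map (fun i => (i, xs.filter (fun x => x != i))) := by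
  induction xs with
  | nil => rfl
  | cons x t ih =>
    have hx : x ∉ t := (List.nodup_cons.mp h).1
    have ht : t.Nodup := (List.nodup_cons.mp h).2
    have h1 : List.filter (fun y => y != x) (x :: t) = t := by
      rw [List.filter_cons_of_neg (by simp)]
      exact List.filter_eq_self.mpr (fun y hy => by
        simp only [bne_iff_ne, ne_eq]
        exact fun e => hx (e ▸ hy))
    rw [pvSels_cons, ih ht]
    simp only [List.map_map, List.map_cons, h1]
    congr 1
    apply List.map_congr_left
    intro i hi
    have hxi : (x != i) = true := by
      simp only [bne_iff_ne, ne_eq]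
      exact fun e => hx (e ▸ hi)
    simp [Function.comp, hxi]

lemma pvPerms_succ (xs : List Int) (r : Nat) :
    PySem.List.permutations xs (r + 1)
      = (pvSels xs).flatMap (fun p => (PySem.List.permutations p.2 r).map (p.1 :: ·)) := by
  rw [PySem.List.permutations, pvSels, List.flatMap_map]
  rw [List.flatMap_def, List.flatMap_def]
  congr 1
  apply List.map_congr_left
  intro i hi
  have hlt : i < xs.length := List.mem_range.mp hi
  simp [List.getElem?_eq_getElem hlt]

lemma pvPerms_nil_of_lt : ∀ (r : Nat) (xs : List Int), xs.length < r →
    PySem.List.permutations xs r = [] := by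
  intro r
  induction r with
  | zero => intro xs h; omega
  | succ r ih =>
    intro xs h
    rw [pvPerms_succ]
    apply List.flatMap_eq_nil_iff.mpr
    intro p hp
    rcases List.mem_map.mp hp with ⟨i, hi, rfl⟩
    have hlt : i < xs.length := List.mem_range.mp hi
    have : (xs.eraseIdx i).length < r := by
      rw [List.length_eraseIdx]
      simp [hlt]; omega
    rw [ih _ this]; rfl

lemma pvLength_mem_perms : ∀ (r : Nat) (xs st : List Int),
    st ∈ PySem.List.permutations xs r → st.length = r := by
  intro r
  induction r with
  | zero =>
    intro xs st h
    have h0 : PySem.List.permutations xs 0 = [[]] := by simp [PySem.List.permutations]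
    rw [h0] at h; simp at h; simp [h]
  | succ r ih =>
    intro xs st h
    rw [pvPerms_succ] at h
    rcases List.mem_flatMap.mp h with ⟨p, _, hst⟩
    rcases List.mem_map.mp hst with ⟨t, ht, rfl⟩
    simp [ih _ _ ht]

lemma pvGet?_foldl_insert {κ ν : Type} [BEq κ] [LawfulBEq κ]
    (L : List κ) (g : κ → ν) (d : PySem.Dict κ ν) (S : κ) :
    ((L.foldl (fun d c => d.insert c (g c)) d).get? S)
      = if S ∈ L then some (g S) else d.get? S := by
  induction L generalizing d with
  | nil => simp
  | cons x L ih =>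
    simp only [List.foldl_cons, ih, List.mem_cons]
    by_cases hSL : S ∈ L
    · simp [hSL]
    · by_cases hx : S = x
      · simp [hx, PySem.Dict.get?_insert_self]
      · simp [hSL, hx, PySem.Dict.get?_insert_of_ne _ _ hx]

lemma pvFoldl_max_flatMap {β : Type} (G : List β) (g : β → List Int) (w : β → Int)
    (h : ∀ p ∈ G, ∀ c : Int, (g p).foldl max c = max c (w p)) :
    ∀ c : Int, (G.flatMap g).foldl max c = G.foldl (fun c p => max c (w p)) c := by
  induction G with
  | nil => intro c; rfl
  | cons p G ih =>
    intro c
    simp only [List.flatMap_cons, List.foldl_append, List.foldl_cons]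
    rw [h p (by simp) c, ih (fun q hq => h q (by simp [hq]))]

lemma pvFoldl_max_shift {α : Type} (t : List α) (f : α → Int) (d : Int) :
    ∀ (c m : Int),
      t.foldl (fun c i => max c (d + f i)) (max c (d + m))
        = max c (d + t.foldl (fun m' i => max m' (f i)) m) := by
  induction t with
  | nil => intro c m; rfl
  | cons y t ih =>
    intro c m
    simp only [List.foldl_cons]
    rw [max_assoc, max_add_add_left, ih]

lemma pvGetD_cons_pos (x : Int) (t : List Int) (m d : Int) (h : 1 ≤ m) :
    PySem.List.pyGetD (x :: t) m d = PySem.List.pyGetD t (m - 1) d := by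
  obtain ⟨s, hs⟩ : ∃ s : Nat, m = ((s : Int) + 1) := ⟨(m - 1).toNat, by omega⟩
  subst hs
  have h1 : ((s : Int) + 1) = ((s + 1 : Nat) : Int) := by push_cast; ring
  rw [h1, PySem.List.pyGetD_natCast]
  have h2 : ((s + 1 : Nat) : Int) - 1 = ((s : Nat) : Int) := by push_cast; ring
  rw [h2, PySem.List.pyGetD_natCast]
  simp [List.getD]

lemma pvSum_eq_ps (ability : List (List Int)) :
    ∀ (st : List Int) (j0 : Int), 0 ≤ j0 →
      ((PySem.List.pyRange j0 (j0 + st.length) 1).map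
          (fun sport => pvA ability (PySem.List.pyGetD st (sport - j0) 0) sport)).sum
        = pvPs ability j0 st := by
  intro st
  induction st with
  | nil =>
    intro j0 _
    rw [show (j0 + ((List.length ([] : List Int) : Int)) = j0) by simp]
    rw [PySem.List.pyRange_one_eq_nil (le_refl j0)]
    rfl
  | cons i t ih =>
    intro j0 hj0
    have hlt : j0 < j0 + ((i :: t).length : Int) := by
      simp only [List.length_cons]; push_cast; omega
    rw [PySem.List.pyRange_one_cons hlt, List.map_cons, List.sum_cons]
    have hhead : pvA ability (PySem.List.pyGetD (i :: t) (j0 - j0) 0) j0 = pvA ability i j0 := by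
      rw [show j0 - j0 = (0 : Int) by ring, PySem.List.pyGetD_zero_cons]
    have hb : j0 + ((i :: t).length : Int) = (j0 + 1) + (t.length : Int) := by
      simp only [List.length_cons]; push_cast; ring
    rw [hhead, hb]
    have htail :
        ((PySem.List.pyRange (j0+1) ((j0+1) + (t.length : Int)) 1).map
            (fun sport => pvA ability (PySem.List.pyGetD (i :: t) (sport - j0) 0) sport))
          = ((PySem.List.pyRange (j0+1) ((j0+1) + (t.length : Int)) 1).map
            (fun sport => pvA ability (PySem.List.pyGetD t (sport - (j0+1)) 0) sport)) := by
      apply List.map_congr_left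
      intro sport hsp
      have hge : j0 + 1 ≤ sport := (PySem.List.mem_pyRange_one.mp hsp).1
      rw [pvGetD_cons_pos i t (sport - j0) 0 (by omega)]
      congr 2
      ring
    rw [htail, ih (j0+1) (by omega)]
    rfl

-- the central correspondence: running max over all r-permutation scores = pvF
lemma pvKey (ability : List (List Int)) (k : Nat) :
    ∀ (r : Nat) (xs : List Int), xs.Nodup → r ≤ xs.length → ∀ (d c : Int),
      ((PySem.List.permutations xs r).map (fun st => d + pvPs ability ((k : Int) - r) st)).foldl max c
        = max c (d + pvF ability k r xs) := by
  intro r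
  induction r with
  | zero =>
    intro xs _ _ d c
    have h0 : PySem.List.permutations xs 0 = [[]] := by simp [PySem.List.permutations]
    simp [h0, pvPs, pvF]
  | succ r ih =>
    intro xs hnd hr d c
    rw [pvPerms_succ, List.map_flatMap]
    rw [pvFoldl_max_flatMap (pvSels xs)
        (fun p => ((PySem.List.permutations p.2 r).map (p.1 :: ·)).map
          (fun st => d + pvPs ability ((k : Int) - (r + 1 : Nat)) st))
        (fun p => d + (pvA ability p.1 ((k : Int) - (r + 1 : Nat)) + pvF ability k r p.2))
        ?hgroups c]
    case hgroups =>
      intro p hp c'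
      dsimp only
      rcases List.mem_map.mp hp with ⟨i, hi, rfl⟩
      have hilt : i < xs.length := List.mem_range.mp hi
      have hnd' : (xs.eraseIdx i).Nodup := (List.eraseIdx_sublist xs i).nodup hnd
      have hlen' : r ≤ (xs.eraseIdx i).length := by
        rw [List.length_eraseIdx]; simp [hilt]; omega
      rw [List.map_map]
      have hfun :
          ((fun st => d + pvPs ability ((k : Int) - (r + 1 : Nat)) st) ∘ ((xs.getD i 0, xs.eraseIdx i).1 :: ·))
            = fun st => (d + pvA ability (xs.getD i 0) ((k : Int) - (r + 1 : Nat)))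
                + pvPs ability ((k : Int) - (r : Nat)) st := by
        funext st
        have hcast : ((k : Int) - (r + 1 : Nat)) + 1 = (k : Int) - (r : Nat) := by
          push_cast; ring
        simp only [Function.comp, pvPs, ← hcast]
        ring
      rw [hfun, ih _ hnd' hlen' _ c']
      congr 1
      dsimp only
      ring
    · rw [pvSels_eq_of_nodup xs hnd, List.foldl_map]
      cases xs with
      | nil => simp at hr
      | cons x t =>
        simp only [List.foldl_cons]
        rw [pvFoldl_max_shift t
            (fun i => pvA ability i ((k : Int) - (r + 1 : Nat))
              + pvF ability k r ((x :: t).filter (fun y => y != i))) d c _]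
        congr 1
        rw [pvF]
        rw [List.map_cons, PySem.List.max?_id_cons, Option.getD_some, List.foldl_map]
        push_cast
        rfl

-- B's layered dictionary satisfies the pvF invariant
lemma pvInv (ability : List (List Int)) (k n : Nat) (hkn : k ≤ n) :
    ∀ (m : Nat), m ≤ k →
      ∀ S ∈ PySem.List.combinations (PySem.List.pyRange 0 (n : Int) 1) (n - k + m),
        (((List.range m).map (fun t : Nat => (k : Int) - 1 - (t : Int))).foldl
            (fun dp j =>
              (PySem.List.combinations (PySem.List.pyRange 0 (n : Int) 1) (n - j.toNat)).foldl
                (fun nd S =>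
                  nd.insert S
                    ((PySem.List.max?
                        (S.map (fun i =>
                          PySem.List.pyGetD (PySem.List.pyGetD ability i []) j 0
                            + dp.getD (S.filter (fun x => x != i)) 0))
                        (fun v => v)).getD 0))
                PySem.Dict.empty)
            ((PySem.List.combinations (PySem.List.pyRange 0 (n : Int) 1) (n - k)).foldl
              (fun d c => d.insert c 0) PySem.Dict.empty)).get? S
          = some (pvF ability k m S) := by
  intro m
  induction m with
  | zero =>
    intro _ S hS
    simp only [List.range_zero, List.map_nil, List.foldl_nil]
    rw [pvGet?_foldl_insert]
    rw [Nat.add_zero] at hS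
    simp [hS, pvF]
  | succ m ih =>
    intro hm S hS
    rw [List.range_succ, List.map_append, List.foldl_append]
    simp only [List.map_cons, List.map_nil, List.foldl_cons, List.foldl_nil]
    have hj : ((k : Int) - 1 - (m : Nat)).toNat = k - 1 - m := by omega
    rw [hj]
    have hn : n - (k - 1 - m) = n - k + m + 1 := by omega
    rw [hn]
    rw [pvGet?_foldl_insert]
    have hS' : S ∈ PySem.List.combinations (PySem.List.pyRange 0 (n : Int) 1) (n - k + m + 1) := hS
    rw [if_pos hS']
    congr 1
    have hnodup : (PySem.List.pyRange 0 (n : Int) 1).Nodup := PySem.List.nodup_pyRange_one 0 (n : Int)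
    obtain ⟨hsub, hlen⟩ := (PySem.List.mem_combinations_iff _ _ _).mp hS
    have hSnd : S.Nodup := hsub.nodup hnodup
    have hmap :
        S.map (fun i =>
            PySem.List.pyGetD (PySem.List.pyGetD ability i []) ((k : Int) - 1 - (m : Nat)) 0
              + (((List.range m).map (fun t : Nat => (k : Int) - 1 - (t : Int))).foldl
                  (fun dp j =>
                    (PySem.List.combinations (PySem.List.pyRange 0 (n : Int) 1) (n - j.toNat)).foldl
                      (fun nd S =>
                        nd.insert S
                          ((PySem.List.max?
                              (S.map (fun i =>
                                PySem.List.pyGetD (PySem.List.pyGetD ability i []) j 0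
                                  + dp.getD (S.filter (fun x => x != i)) 0))
                              (fun v => v)).getD 0))
                      PySem.Dict.empty)
                  ((PySem.List.combinations (PySem.List.pyRange 0 (n : Int) 1) (n - k)).foldl
                    (fun d c => d.insert c 0) PySem.Dict.empty)).getD (S.filter (fun x => x != i)) 0)
          = S.map (fun i =>
              pvA ability i ((k : Int) - (m + 1 : Nat))
                + pvF ability k m (S.filter (fun x => x != i))) := by
      apply List.map_congr_left
      intro i hiS
      have hfe : S.filter (fun x => x != i) = S.erase i := (hSnd.erase_eq_filter i).symm
      have hmem : S.erase i ∈ PySem.List.combinations (PySem.List.pyRange 0 (n : Int) 1) (n - k + m) := by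
        apply (PySem.List.mem_combinations_iff _ _ _).mpr
        constructor
        · exact (List.erase_sublist : (S.erase i).Sublist S).trans hsub
        · rw [List.length_erase_of_mem hiS, hlen]
          omega
      have hget := ih (by omega) (S.erase i) hmem
      rw [hfe, PySem.Dict.getD_eq_get?_getD, hget, Option.getD_some]
      have hcast : ((k : Int) - 1 - (m : Nat)) = (k : Int) - (m + 1 : Nat) := by
        push_cast; ring
      rw [hcast, pvA]
    rw [hmap, pvF]
    norm_cast

-- A-side summary: the permutation loop computes max 0 (pvF k k students)
lemma pvMainA (ability : List (List Int)) (k n : Nat) (hkn : k ≤ n) :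
    (PySem.List.permutations (PySem.List.pyRange 0 (n : Int) 1) k).foldl
      (fun answer st =>
        max answer
          ((PySem.List.pyRange 0 (k : Int) 1).foldl
            (fun count sport =>
              count + PySem.List.pyGetD (PySem.List.pyGetD ability (PySem.List.pyGetD st sport 0) []) sport 0)
            0))
      0
    = max 0 (pvF ability k k (PySem.List.pyRange 0 (n : Int) 1)) := by
  have hnodup := PySem.List.nodup_pyRange_one 0 (n : Int)
  have hlenst : (PySem.List.pyRange 0 (n : Int) 1).length = n := by
    rw [PySem.List.length_pyRange_one]; omega
  have hbody : ∀ (acc : Int) (st : List Int),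
      st ∈ PySem.List.permutations (PySem.List.pyRange 0 (n : Int) 1) k →
      (max acc
          ((PySem.List.pyRange 0 (k : Int) 1).foldl
            (fun count sport =>
              count + PySem.List.pyGetD (PySem.List.pyGetD ability (PySem.List.pyGetD st sport 0) []) sport 0)
            0))
        = max acc (pvPs ability 0 st) := by
    intro acc st hst
    have hlst : st.length = k := pvLength_mem_perms k _ st hst
    congr 1
    rw [PySem.List.foldl_add]
    rw [show ((k : Int) = 0 + (st.length : Int)) by rw [hlst]; ring]
    rw [show (PySem.List.pyRange 0 (0 + (st.length : Int)) 1).map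
          (fun sport =>
            PySem.List.pyGetD (PySem.List.pyGetD ability (PySem.List.pyGetD st sport 0) []) sport 0)
        = (PySem.List.pyRange 0 (0 + (st.length : Int)) 1).map
          (fun sport => pvA ability (PySem.List.pyGetD st (sport - 0) 0) sport) by
      apply List.map_congr_left; intro sport _; rw [sub_zero]; rfl]
    rw [pvSum_eq_ps ability st 0 (le_refl 0)]
    ring
  have hA := PySem.List.foldl_congr_mem _ _
    (fun answer st => max answer (pvPs ability 0 st)) (0 : Int) hbody
  rw [hA]
  have hKey := pvKey ability k k (PySem.List.pyRange 0 (n : Int) 1) hnodup (by omega) 0 0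
  simp only [sub_self, zero_add] at hKey
  rw [List.foldl_map] at hKey
  exact hKey

-- ===== VERDICT (by name: the statement is the Claim_ definition above) =====
theorem solution_spec : Claim_equal_solution := by
  intro ability _ _
  unfold Spec_solution solution solution_alt
  simp only [PySem.List.len_eq]
  by_cases hkn : (PySem.List.pyGetD ability 0 []).length > ability.length
  · rw [if_pos hkn]
    rw [pvPerms_nil_of_lt _ _ (by rw [PySem.List.length_pyRange_one]; omega)]
    rfl
  · rw [if_neg hkn]
    have hkn' : (PySem.List.pyGetD ability 0 []).length ≤ ability.length := not_lt.mp hkn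
    have hlenst : (PySem.List.pyRange 0 (ability.length : Int) 1).length = ability.length := by
      rw [PySem.List.length_pyRange_one]; omega
    have h1 : ability.length - (PySem.List.pyGetD ability 0 []).length
        + (PySem.List.pyGetD ability 0 []).length = ability.length := by omega
    have h3 := PySem.List.combinations_length_self
      (xs := PySem.List.pyRange 0 (ability.length : Int) 1)
    rw [hlenst] at h3
    have hmemS : PySem.List.pyRange 0 (ability.length : Int) 1
        ∈ PySem.List.combinations (PySem.List.pyRange 0 (ability.length : Int) 1)
            (ability.length - (PySem.List.pyGetD ability 0 []).length
              + (PySem.List.pyGetD ability 0 []).length) := by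
      rw [h1, h3]
      exact List.mem_singleton.mpr rfl
    have hB := pvInv ability _ _ hkn' _ (le_refl _) _ hmemS
    have hcount : PySem.List.pyRange (((PySem.List.pyGetD ability 0 []).length : Int) - 1) (-1) (-1)
        = (List.range (PySem.List.pyGetD ability 0 []).length).map
            (fun t : Nat => ((PySem.List.pyGetD ability 0 []).length : Int) - 1 - (t : Int)) := by
      rw [PySem.List.pyRange_neg_one]
      rw [show ((((PySem.List.pyGetD ability 0 []).length : Int) - 1) - (-1)).toNat
          = (PySem.List.pyGetD ability 0 []).length from by omega]
    rw [hcount, PySem.Dict.getD_eq_get?_getD, hB, Option.getD_some]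
    exact pvMainA ability _ _ hkn'
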